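-- pv_equiv track=rewrite | github.com/JuanGar1012/rag-pipeline-lab | backend/app/chunking/strategies.py | _overlap_spans
-- ===== SOURCE A (Python) =====
-- def _overlap_spans(words: list[str], chunk_size: int, overlap: int) -> list[str]:
--     step = max(1, chunk_size - overlap)
--     spans = []
--     for index in range(0, len(words), step):
--         window = words[index : index + chunk_size]
--         if not window:
--             continue
--         spans.append(" ".join(window))
--         if index + chunk_size >= len(words):
--             break
--     return spans
-- ===== SOURCE B (Python) =====
-- def _overlap_spans(words: list[str], chunk_size: int, overlap: int) -> list[str]:
--     step = max(1, chunk_size - overlap)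
--     spans = []
--     window = []
--     skip = 0
--     covered = False
--     for pos, word in enumerate(words):
--         if skip:
--             skip -= 1
--             continue
--         window.append(word)
--         if len(window) == chunk_size:
--             spans.append(" ".join(window))
--             covered = pos == len(words) - 1
--             window = window[step:]
--             skip = max(step - chunk_size, 0)
--     if window and not covered:
--         spans.append(" ".join(window))
--     return spans
-- ===== Notes on version B (the rewrite author's own statement) =====
-- stated objective: alternative
-- what changed: B replaces A's loop over precomputed start indices with per-iteration slicing and an early break by a single streaming pass over the words themselves, growing a window buffer word by word, emitting it when full and skipping gap words via a countdown; Pre_ excludes chunk_size <= 0, outside the task's natural domain, where A's windows are empty-/negative-slice artefacts that B's buffer algorithm does not reproduce.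
-- outside the precondition, e.g. on _overlap_spans(['a', 'b'], 0, -1): A returns [], B returns ['a b']; on _overlap_spans(['a'], -1, 0): A returns [], B returns ['a']
import Mathlib
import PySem

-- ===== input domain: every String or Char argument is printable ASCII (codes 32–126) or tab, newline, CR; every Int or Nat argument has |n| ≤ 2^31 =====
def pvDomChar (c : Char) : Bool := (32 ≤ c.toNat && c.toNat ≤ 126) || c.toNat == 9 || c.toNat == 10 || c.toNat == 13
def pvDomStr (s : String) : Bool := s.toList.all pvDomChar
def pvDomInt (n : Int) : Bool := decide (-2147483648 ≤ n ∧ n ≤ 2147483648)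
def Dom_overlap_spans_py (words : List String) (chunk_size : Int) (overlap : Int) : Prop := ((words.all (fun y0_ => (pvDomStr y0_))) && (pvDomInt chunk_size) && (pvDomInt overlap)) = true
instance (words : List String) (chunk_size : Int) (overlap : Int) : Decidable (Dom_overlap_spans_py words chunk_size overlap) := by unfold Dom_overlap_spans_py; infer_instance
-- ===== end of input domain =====

-- B replaces A's index-range loop with slicing by a single streaming pass over the words
-- themselves, maintaining the current window as a buffer (objective: alternative).

-- ===== PORT A =====
-- the for-loop over range(0, len(words), step) with its continue/break, recursing over the index list
def pvLoopA (words : List String) (cs : Int) : List Int → List String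
  | [] => []
  | i :: rest =>
    if PySem.List.slice words (some i) (some (i + cs)) = [] then
      pvLoopA words cs rest
    else
      if ((words.length : Int)) ≤ i + cs then
        [PySem.Str.join " " (PySem.List.slice words (some i) (some (i + cs)))]
      else
        PySem.Str.join " " (PySem.List.slice words (some i) (some (i + cs))) :: pvLoopA words cs rest

def overlap_spans_py (words : List String) (chunk_size : Int) (overlap : Int) : List String :=
  let step := max 1 (chunk_size - overlap)
  pvLoopA words chunk_size (PySem.List.pyRange 0 ((words.length : Int)) step)

-- ===== PORT B =====
-- loop body of Source B's 'for pos, word in enumerate(words)'; state = (spans, window, skip, covered)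
def pvStepB (nw cs step : Int) (st : List String × List String × Int × Bool)
    (pw : Int × String) : List String × List String × Int × Bool :=
  match st, pw with
  | (spans, window, skip, covered), (pos, word) =>
    if skip ≠ 0 then (spans, window, skip - 1, covered)
    else
      let window' := window ++ [word]
      if (window'.length : Int) = cs then
        (spans ++ [PySem.Str.join " " window'],
         PySem.List.slice window' (some step) none,
         max (step - cs) 0,
         decide (pos = nw - 1))
      else (spans, window', skip, covered)

def overlap_spans_py_alt (words : List String) (chunk_size : Int) (overlap : Int) : List String :=
  let step := max 1 (chunk_size - overlap)
  let st := (PySem.List.enumerate words 0).foldl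
      (pvStepB ((words.length : Int)) chunk_size step) ([], [], 0, false)
  let spans := st.1
  let window := st.2.1
  let covered := st.2.2.2
  if window ≠ [] ∧ covered = false then spans ++ [PySem.Str.join " " window] else spans

-- ===== PRECONDITION & SPEC =====
-- Pre_ excludes chunk_size ≤ 0, outside the task's natural domain: there A's returned windows are
-- artefacts of Python's empty- and negative-slice behaviour (words[i:i+chunk_size] is empty or
-- wraps around), which B's buffer-based algorithm naturally does not reproduce.
def Pre_overlap_spans_py (words : List String) (chunk_size : Int) (overlap : Int) : Prop :=
  1 ≤ chunk_size
instance (words : List String) (chunk_size : Int) (overlap : Int) : Decidable (Pre_overlap_spans_py words chunk_size overlap) := by unfold Pre_overlap_spans_py; infer_instance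

def pvWitness_overlap_spans_py : List String × Int × Int := (["ab", "cd", "ef"], 2, 1)

def Spec_overlap_spans_py (words : List String) (chunk_size : Int) (overlap : Int) (out : List String) : Prop := out = overlap_spans_py_alt words chunk_size overlap
instance (words : List String) (chunk_size : Int) (overlap : Int) (out : List String) : Decidable (Spec_overlap_spans_py words chunk_size overlap out) := by unfold Spec_overlap_spans_py; infer_instance

-- ===== CLAIM (what is proved, stated in full; the proofs are below) =====
def Claim_equal_overlap_spans_py : Prop := ∀ (words : List String) (chunk_size : Int) (overlap : Int), Dom_overlap_spans_py words chunk_size overlap → Pre_overlap_spans_py words chunk_size overlap → Spec_overlap_spans_py words chunk_size overlap (overlap_spans_py words chunk_size overlap)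

-- ===== LEMMAS AND PROOFS =====

-- range(a,b,s) for positive step: cons / nil unfolding
theorem pvRange_pos_nil {a b s : Int} (hs : 0 < s) (h : b ≤ a) :
    PySem.List.pyRange a b s = [] := by
  rw [PySem.List.pyRange_of_pos a b hs]
  simp [show ¬ a < b by omega]

theorem pvRange_pos_cons {a b s : Int} (hs : 0 < s) (h : a < b) :
    PySem.List.pyRange a b s = a :: PySem.List.pyRange (a + s) b s := by
  rw [PySem.List.pyRange_of_pos a b hs, PySem.List.pyRange_of_pos (a + s) b hs]
  have hc : ((b - a + s - 1) / s).toNat = (if a + s < b then ((b - (a + s) + s - 1) / s).toNat else 0) + 1 := by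
    by_cases h2 : a + s < b
    · simp only [if_pos h2]
      have : (b - a + s - 1) / s = (b - (a + s) + s - 1) / s + 1 := by
        have := Int.add_mul_ediv_right (b - (a + s) + s - 1) 1 (by omega : s ≠ 0)
        rw [show b - a + s - 1 = b - (a + s) + s - 1 + 1 * s by ring, this]
      rw [this]
      have h0 : 0 ≤ (b - (a + s) + s - 1) / s := Int.ediv_nonneg (by omega) (by omega)
      omega
    · simp only [if_neg h2]
      have h1 : 1 ≤ (b - a + s - 1) / s := by
        rw [Int.le_ediv_iff_mul_le hs]; omega
      have h2' : (b - a + s - 1) / s < 2 := by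
        rw [Int.ediv_lt_iff_lt_mul hs]; omega
      omega
  rw [if_pos h, hc, List.range_succ_eq_map]
  simp only [List.map_cons, List.map_map]
  congr 1
  · simp
  · apply List.map_congr_left
    intro k _
    simp only [Function.comp_apply, Nat.succ_eq_add_one]
    push_cast
    ring

-- a window words[i:i+cs] with 0 ≤ i < len(words) and 1 ≤ cs is nonempty
theorem pvSlice_ne_nil (words : List String) {i cs : Int} (h0 : 0 ≤ i)
    (hi : i < (words.length : Int)) (hcs : 1 ≤ cs) :
    PySem.List.slice words (some i) (some (i + cs)) ≠ [] := by
  rw [PySem.List.slice_toNat words h0 (by omega)]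
  intro hnil
  have := congrArg List.length hnil
  simp [List.length_take, List.length_drop] at this
  omega

-- two multiples of step in strict order are at least step apart
theorem pvMultGap {step a b : Int} (hs : 0 < step) (ha : step ∣ a) (hb : step ∣ b)
    (h : a < b) : a + step ≤ b := by
  obtain ⟨p, hp⟩ := ha
  obtain ⟨q, hq⟩ := hb
  have hpq : p < q := by
    by_contra hle
    push_neg at hle
    have := mul_le_mul_of_nonneg_left hle (le_of_lt hs)
    omega
  have := mul_le_mul_of_nonneg_left (by omega : p + 1 ≤ q) (le_of_lt hs)
  nlinarith

-- A's loop invariant: from any reached start i (a multiple of step, ≤ last),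
-- A's loop produces exactly the joins at the remaining starts up to min A0 M
theorem pvKey (words : List String) (cs step A0 M : Int)
    (hcs : 1 ≤ cs) (hs : 0 < step)
    (hdA : step ∣ A0) (htA : max ((words.length : Int) - cs) 0 ≤ A0)
    (hAt : A0 < max ((words.length : Int) - cs) 0 + step)
    (hdM : step ∣ M) (hM1 : M ≤ (words.length : Int) - 1)
    (hM2 : (words.length : Int) - 1 < M + step) :
    ∀ (k : Nat) (i : Int), 0 ≤ i → step ∣ i → i ≤ min A0 M →
      (min A0 M - i).toNat ≤ k →
      pvLoopA words cs (PySem.List.pyRange i ((words.length : Int)) step) =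
        (PySem.List.pyRange i (min A0 M + 1) step).map
          (fun j => PySem.Str.join " " (PySem.List.slice words (some j) (some (j + cs)))) := by
  intro k
  induction k with
  | zero =>
    intro i h0 hdi hil hk
    have hieq : i = min A0 M := by omega
    have hin : i < (words.length : Int) := by omega
    rw [pvRange_pos_cons hs hin, pvRange_pos_cons hs (by omega : i < min A0 M + 1),
        pvRange_pos_nil hs (by omega : min A0 M + 1 ≤ i + step)]
    simp only [pvLoopA, if_neg (pvSlice_ne_nil words h0 hin hcs), List.map_cons, List.map_nil]
    by_cases hb : (words.length : Int) ≤ i + cs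
    · rw [if_pos hb]
    · rw [if_neg hb, pvRange_pos_nil hs (by omega : (words.length : Int) ≤ i + step)]
      simp [pvLoopA]
  | succ k ih =>
    intro i h0 hdi hil hk
    have hin : i < (words.length : Int) := by omega
    rw [pvRange_pos_cons hs hin]
    simp only [pvLoopA, if_neg (pvSlice_ne_nil words h0 hin hcs)]
    by_cases hb : (words.length : Int) ≤ i + cs
    · rw [if_pos hb]
      have hti : max ((words.length : Int) - cs) 0 ≤ i := by omega
      have hA0i : A0 ≤ i := by
        by_contra hlt
        push_neg at hlt
        have := pvMultGap hs hdi hdA hlt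
        omega
      have hieq : i = min A0 M := by omega
      rw [pvRange_pos_cons hs (by omega : i < min A0 M + 1),
          pvRange_pos_nil hs (by omega : min A0 M + 1 ≤ i + step)]
      simp
    · rw [if_neg hb]
      by_cases hnext : i + step < (words.length : Int)
      · have hiA0 : i + step ≤ A0 := pvMultGap hs hdi hdA (by omega)
        have hiM : i + step ≤ M := by
          by_contra hlt
          push_neg at hlt
          have := pvMultGap hs hdM (Dvd.dvd.add hdi (dvd_refl step)) hlt
          omega
        rw [ih (i + step) (by omega) (Dvd.dvd.add hdi (dvd_refl step)) (by omega) (by omega)]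
        rw [pvRange_pos_cons hs (by omega : i < min A0 M + 1)]
        simp
      · rw [pvRange_pos_nil hs (by omega : (words.length : Int) ≤ i + step)]
        rw [pvRange_pos_cons hs (by omega : i < min A0 M + 1),
            pvRange_pos_nil hs (by omega : min A0 M + 1 ≤ i + step)]
        simp [pvLoopA]

-- a range with positive step s written out by multiples: K starts a, a+s, …, a+(K-1)s
theorem pvRangeEnum {s : Int} (hs : 0 < s) :
    ∀ (K : Nat) (a : Int),
      PySem.List.pyRange a (a + (K : Int) * s - s + 1) s
        = (List.range K).map (fun m : Nat => a + (m : Int) * s) := by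
  intro K
  induction K with
  | zero =>
    intro a
    rw [pvRange_pos_nil hs (by push_cast; omega)]
    simp
  | succ K ih =>
    intro a
    have hKs : (0 : Int) ≤ (K : Int) * s := by positivity
    rw [pvRange_pos_cons hs (by push_cast; nlinarith)]
    push_cast
    rw [show a + ((K : Int) + 1) * s - s + 1 = (a + s) + (K : Int) * s - s + 1 by ring]
    rw [ih (a + s), List.range_succ_eq_map]
    simp only [List.map_cons, List.map_map]
    congr 1
    · simp
    · apply List.map_congr_left
      intro m _
      simp only [Function.comp_apply]
      push_cast
      ring

-- ===== B's closed-form loop state =====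
-- number of emitted chunks after p words have been consumed
def pvKf (c s p : Nat) : Nat := if p < c then 0 else (p - c) / s + 1

-- the chunk at start m*s
def pvG (words : List String) (c s m : Nat) : String :=
  PySem.Str.join " " ((words.drop (m * s)).take c)

-- the fold state after p words
def pvState (words : List String) (c s p : Nat) : List String × List String × Int × Bool :=
  ((List.range (pvKf c s p)).map (pvG words c s),
   (words.drop (pvKf c s p * s)).take (p - pvKf c s p * s),
   ((pvKf c s p * s - p : Nat) : Int),
   decide (1 ≤ pvKf c s p ∧ (pvKf c s p - 1) * s + c = words.length))

theorem pvKf_lt (c s p : Nat) (hc : 1 ≤ c) (hs : 1 ≤ s) : p < pvKf c s p * s + c := by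
  unfold pvKf
  split_ifs with h
  · omega
  · have h1 := Nat.div_add_mod (p - c) s
    have h2 : (p - c) % s < s := Nat.mod_lt _ (by omega)
    have h3 : ((p - c) / s + 1) * s = s * ((p - c) / s) + s := by ring
    omega

theorem pvKf_le (c s p : Nat) (h : 1 ≤ pvKf c s p) : (pvKf c s p - 1) * s + c ≤ p := by
  unfold pvKf at *
  split_ifs at * with hp
  · omega
  · simp only [Nat.add_sub_cancel]
    have h1 : (p - c) / s * s ≤ p - c := Nat.div_mul_le_self _ _
    omega

theorem pvKf_succ (c s p : Nat) (hc : 1 ≤ c) (hs : 1 ≤ s) :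
    pvKf c s (p + 1) = if p + 1 = pvKf c s p * s + c then pvKf c s p + 1 else pvKf c s p := by
  have hlt := pvKf_lt c s p hc hs
  split_ifs with h
  · have hcp : ¬ (p + 1 < c) := by omega
    have hu : pvKf c s (p + 1) = (p + 1 - c) / s + 1 := by
      unfold pvKf; rw [if_neg hcp]
    have hx : p + 1 - c = pvKf c s p * s := by omega
    rw [hu, hx, Nat.mul_div_cancel _ (by omega)]
  · by_cases hcp : p + 1 < c
    · have h1 : pvKf c s (p + 1) = 0 := by unfold pvKf; rw [if_pos hcp]
      have h2 : pvKf c s p = 0 := by unfold pvKf; rw [if_pos (by omega : p < c)]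
      rw [h1, h2]
    · have hppc : ¬ (p < c) := by
        intro hpc
        have h1 : pvKf c s p = 0 := by unfold pvKf; rw [if_pos hpc]
        have h0 : pvKf c s p * s = 0 := by rw [h1, Nat.zero_mul]
        omega
      have hk : pvKf c s p = (p - c) / s + 1 := by unfold pvKf; rw [if_neg hppc]
      rw [hk] at hlt h
      have h1 := Nat.div_add_mod (p - c) s
      have h2 : (p - c) % s < s := Nat.mod_lt _ (by omega)
      have h4 : ((p - c) / s + 1) * s = (p - c) / s * s + s := Nat.succ_mul _ _
      have h5 : (p - c) / s * s = s * ((p - c) / s) := Nat.mul_comm _ _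
      have hlow : (p - c) / s * s ≤ p + 1 - c :=
        le_trans (Nat.div_mul_le_self _ _) (by omega)
      have hhigh : p + 1 - c < ((p - c) / s + 1) * s := by omega
      have hdiv : (p + 1 - c) / s = (p - c) / s := Nat.div_eq_of_lt_le hlow hhigh
      have hu : pvKf c s (p + 1) = (p + 1 - c) / s + 1 := by
        unfold pvKf; rw [if_neg (by omega : ¬ (p + 1 < c))]
      rw [hu, hdiv, ← hk]

-- one loop iteration takes the closed-form state at p to the one at p+1
theorem pvStepB_state (words : List String) (cs step : Int) (hc : 1 ≤ cs) (hs : 1 ≤ step)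
    (p : Nat) (hp : p < words.length) :
    pvStepB ((words.length : Int)) cs step (pvState words cs.toNat step.toNat p)
        ((p : Int), words[p]) = pvState words cs.toNat step.toNat (p + 1) := by
  set c := cs.toNat with hcdef
  set s := step.toNat with hsdef
  have hcc : (c : Int) = cs := Int.toNat_of_nonneg (by omega)
  have hss : (s : Int) = step := Int.toNat_of_nonneg (by omega)
  have hc1 : 1 ≤ c := by omega
  have hs1 : 1 ≤ s := by omega
  have hlt : p < pvKf c s p * s + c := pvKf_lt c s p hc1 hs1
  simp only [pvState, pvStepB, pvKf_succ c s p hc1 hs1]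
  obtain ⟨k, hkg⟩ : ∃ k, pvKf c s p = k := ⟨_, rfl⟩
  rw [hkg] at hlt
  rw [hkg]
  by_cases hskip : k * s ≤ p
  · -- skip = 0: consume the word into the window
    rw [if_neg (show ¬ ((k * s - p : Nat) : Int) ≠ 0 by omega)]
    have hwin : (words.drop (k * s)).take (p - k * s) ++ [words[p]]
        = (words.drop (k * s)).take (p + 1 - k * s) := by
      have hg : words[p] = (words.drop (k * s))[p - k * s]'(by simp; omega) := by
        rw [List.getElem_drop]
        congr 1
        omega
      rw [hg, List.take_concat_get' _ _ (by simp; omega)]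
      congr 1
      omega
    rw [hwin]
    by_cases hfull : p + 1 = k * s + c
    · -- the window just became full: emit
      rw [if_pos (show ((((words.drop (k * s)).take (p + 1 - k * s)).length : Nat) : Int) = cs by
        simp only [List.length_take, List.length_drop]
        omega)]
      rw [if_pos hfull]
      refine congrArg₂ Prod.mk ?_ (congrArg₂ Prod.mk ?_ (congrArg₂ Prod.mk ?_ ?_))
      · -- spans
        rw [List.range_succ, List.map_append]
        congr 1
        simp only [List.map_cons, List.map_nil, pvG]
        rw [show p + 1 - k * s = c by omega]
      · -- window
        rw [PySem.List.slice_from _ (show (0 : Int) ≤ step by omega), ← hsdef]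
        rw [List.drop_take, List.drop_drop]
        rw [show (k + 1) * s = k * s + s by ring]
        congr 1
        omega
      · -- skip
        rw [show (k + 1) * s = k * s + s by ring, ← hcc, ← hss]
        omega
      · -- covered
        simp only [decide_eq_decide, Nat.add_sub_cancel]
        omega
    · -- window not yet full
      rw [if_neg (show ¬ ((((words.drop (k * s)).take (p + 1 - k * s)).length : Nat) : Int) = cs by
        simp only [List.length_take, List.length_drop]
        omega)]
      rw [if_neg hfull]
      exact congrArg₂ Prod.mk rfl (congrArg₂ Prod.mk rfl (congrArg₂ Prod.mk (by omega) rfl))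
  · -- skip > 0: drop the word
    rw [if_pos (show ((k * s - p : Nat) : Int) ≠ 0 by omega)]
    rw [if_neg (show ¬ p + 1 = k * s + c by omega)]
    refine congrArg₂ Prod.mk rfl (congrArg₂ Prod.mk ?_ (congrArg₂ Prod.mk (by omega) rfl))
    congr 1
    omega

-- the whole fold over the first p enumerated words reaches the closed-form state
theorem pvFoldB (words : List String) (cs step : Int) (hc : 1 ≤ cs) (hs : 1 ≤ step) :
    ∀ p, p ≤ words.length →
      (PySem.List.enumerate (words.take p) 0).foldl
          (pvStepB ((words.length : Int)) cs step) ([], [], 0, false)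
        = pvState words cs.toNat step.toNat p := by
  intro p
  induction p with
  | zero =>
    intro _
    have hk0 : pvKf cs.toNat step.toNat 0 = 0 := by
      unfold pvKf
      rw [if_pos (by omega : 0 < cs.toNat)]
    simp [PySem.List.enumerate_nil, pvState, hk0]
  | succ p ih =>
    intro hp1
    have hp : p < words.length := by omega
    rw [← List.take_concat_get' words p hp]
    rw [PySem.List.enumerate_append, List.foldl_append]
    rw [ih (by omega)]
    have hlen : (((words.take p).length : Nat) : Int) = (p : Int) := by
      simp only [List.length_take]
      omega
    rw [hlen]
    simp only [PySem.List.enumerate_cons, PySem.List.enumerate_nil, List.foldl_cons,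
      List.foldl_nil, zero_add]
    exact pvStepB_state words cs step hc hs p hp

-- the chunk A builds at start m*step is B's chunk pvG m
theorem pvFG (words : List String) (cs step : Int) (hc : 1 ≤ cs) (hs : 1 ≤ step) (m : Nat) :
    PySem.Str.join " " (PySem.List.slice words (some (0 + (m : Int) * step))
        (some (0 + (m : Int) * step + cs)))
      = pvG words cs.toNat step.toNat m := by
  have h1 : (0 + (m : Int) * step) = ((m * step.toNat : Nat) : Int) := by
    push_cast [Int.toNat_of_nonneg (show (0 : Int) ≤ step by omega)]
    ring
  have h2 : cs = ((cs.toNat : Nat) : Int) := (Int.toNat_of_nonneg (by omega)).symm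
  rw [h1]
  conv_lhs => rw [h2]
  rw [PySem.List.slice_natCast_add]
  rfl

-- given witnesses A0 M for A's break point with min A0 M = (K'-1)·step, A is the K' chunks
theorem pvA_closed (words : List String) (cs ov A0 M : Int) (hcs : 1 ≤ cs)
    (hdA : max 1 (cs - ov) ∣ A0)
    (htA : max ((words.length : Int) - cs) 0 ≤ A0)
    (hAt : A0 < max ((words.length : Int) - cs) 0 + max 1 (cs - ov))
    (hdM : max 1 (cs - ov) ∣ M)
    (hM1 : M ≤ (words.length : Int) - 1)
    (hM2 : (words.length : Int) - 1 < M + max 1 (cs - ov))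
    (K' : Nat) (hK' : 1 ≤ K')
    (hmin : min A0 M = ((K' : Int) - 1) * max 1 (cs - ov)) :
    overlap_spans_py words cs ov
      = (List.range K').map (pvG words cs.toNat (max 1 (cs - ov)).toNat) := by
  set step : Int := max 1 (cs - ov) with hstep
  have hs0 : 0 < step := by omega
  have hmin0 : 0 ≤ min A0 M := by
    rw [hmin]
    have h1 : (0 : Int) ≤ (K' : Int) - 1 := by omega
    positivity
  simp only [overlap_spans_py]
  rw [← hstep]
  rw [pvKey words cs step A0 M hcs hs0 hdA htA hAt hdM hM1 hM2
    (min A0 M).toNat 0 le_rfl (dvd_zero step) hmin0 (by omega)]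
  rw [show min A0 M + 1 = 0 + (K' : Int) * step - step + 1 by rw [hmin]; ring]
  rw [pvRangeEnum hs0 K' 0, List.map_map]
  apply List.map_congr_left
  intro m _
  exact pvFG words cs step hcs (by omega) m

-- ===== VERDICT (by name: the statement is the Claim_ definition above) =====
theorem overlap_spans_py_spec : Claim_equal_overlap_spans_py := by
  intro words cs ov _hdom hpre
  unfold Spec_overlap_spans_py
  have hcs : 1 ≤ cs := hpre
  obtain ⟨n, hn⟩ : ∃ x, words.length = x := ⟨_, rfl⟩
  obtain ⟨step, hstep⟩ : ∃ x, max 1 (cs - ov) = x := ⟨_, rfl⟩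
  have hs0 : 0 < step := by rw [← hstep]; omega
  obtain ⟨c, hcdef⟩ : ∃ x, cs.toNat = x := ⟨_, rfl⟩
  obtain ⟨s, hsdef⟩ : ∃ x, step.toNat = x := ⟨_, rfl⟩
  have hcc : (c : Int) = cs := by rw [← hcdef]; exact Int.toNat_of_nonneg (by omega)
  have hss : (s : Int) = step := by rw [← hsdef]; exact Int.toNat_of_nonneg (by omega)
  have hc1 : 1 ≤ c := by omega
  have hs1 : 1 ≤ s := by omega
  -- rewrite B into its closed form
  have henum : PySem.List.enumerate words 0 = PySem.List.enumerate (words.take n) 0 := by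
    rw [← hn, List.take_length]
  have hfold := pvFoldB words cs step hcs (by omega) n (by rw [← hn])
  have hdvd : ∀ m : Nat, step ∣ ((m * s : Nat) : Int) := by
    intro m
    exact ⟨(m : Int), by push_cast [← hss]; ring⟩
  conv_rhs => rw [overlap_spans_py_alt]
  rw [hstep, henum, hfold, hcdef, hsdef]
  simp only [pvState]
  rw [hn]
  obtain ⟨K, hKg⟩ : ∃ K, pvKf c s n = K := ⟨_, rfl⟩
  rw [hKg]
  have hKlt : n < K * s + c := by rw [← hKg]; exact pvKf_lt c s n hc1 hs1
  rcases Nat.eq_zero_or_pos n with hn0 | hn1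
  · -- empty input: both sides are []
    have hwnil : words = [] := List.eq_nil_of_length_eq_zero (by omega)
    have hK0 : K = 0 := by
      rw [← hKg]; unfold pvKf; rw [if_pos (by omega)]
    rw [if_neg (by
      rintro ⟨habs, -⟩
      apply habs
      simp [hwnil])]
    rw [hK0]
    simp only [List.range_zero, List.map_nil]
    simp only [overlap_spans_py]
    rw [hstep]
    rw [show ((words.length : Nat) : Int) = (0 : Int) by rw [hn, hn0]; rfl]
    rw [pvRange_pos_nil hs0 le_rfl]
    simp [pvLoopA]
  · -- n ≥ 1; the largest multiple of step that is ≤ n - 1, as an explicit value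
    obtain ⟨Mx, hMxdef⟩ : ∃ Mx, (n - 1) / s * s = Mx := ⟨_, rfl⟩
    have hMxle : Mx ≤ n - 1 := hMxdef ▸ Nat.div_mul_le_self (n - 1) s
    have hMx2n : n - 1 < Mx + s := by
      have h1 := Nat.div_add_mod (n - 1) s
      have h2 : (n - 1) % s < s := Nat.mod_lt _ (by omega)
      have h3 : Mx = s * ((n - 1) / s) := by rw [← hMxdef]; ring
      omega
    have hMxd : step ∣ (Mx : Int) := by rw [← hMxdef]; exact hdvd _
    have hMxge : ∀ m : Nat, m * s ≤ n - 1 → m * s ≤ Mx := by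
      intro m hm
      rw [← hMxdef]
      exact Nat.mul_le_mul_right s ((Nat.le_div_iff_mul_le (by omega)).mpr hm)
    rcases Nat.eq_zero_or_pos K with hK0 | hK1
    · -- no full window fits: one chunk covering all the words
      have hnc : n < c := by
        have h0 : K * s = 0 := by rw [hK0, Nat.zero_mul]
        omega
      rw [hK0]
      simp only [List.range_zero, List.map_nil, Nat.zero_mul, List.drop_zero, Nat.sub_zero,
        List.nil_append]
      rw [if_pos (by
        refine ⟨?_, by simp⟩
        rw [List.take_of_length_le (by rw [hn])]
        intro habs
        have h1 := congrArg List.length habs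
        simp only [List.length_nil] at h1
        omega)]
      rw [pvA_closed words cs ov 0 (Mx : Int) hcs (dvd_zero _)
        (by rw [hn]; omega) (by rw [hn, hstep]; omega)
        (by rw [hstep]; exact hMxd) (by rw [hn]; omega)
        (by rw [hn, hstep]; omega) 1 le_rfl
        (by rw [hstep, min_eq_left (Int.natCast_nonneg Mx)]; push_cast; ring)]
      rw [hstep, hcdef, hsdef]
      simp only [List.range_one, List.map_cons, List.map_nil]
      unfold pvG
      rw [Nat.zero_mul, List.drop_zero]
      have e1 : words.take c = words := List.take_of_length_le (by rw [hn]; omega)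
      have e2 : words.take n = words := List.take_of_length_le (by rw [hn])
      rw [e1, e2]
    · -- at least one full window was emitted
      obtain ⟨K', rfl⟩ : ∃ K', K = K' + 1 := ⟨K - 1, by omega⟩
      have hEle : K' * s + c ≤ n := by
        have h1 := pvKf_le c s n (by rw [hKg]; omega)
        rw [hKg] at h1
        simpa using h1
      have hT : (K' + 1) * s = K' * s + s := by ring
      have hdE : step ∣ ((K' * s : Nat) : Int) := hdvd _
      have hdT : step ∣ (((K' + 1) * s : Nat) : Int) := hdvd _
      by_cases hcov : K' * s + c = n
      · -- the last emitted window ends exactly at the last word: no tail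
        rw [if_neg (by
          rintro ⟨-, habs⟩
          rw [decide_eq_false_iff_not] at habs
          exact habs ⟨by omega, by simp only [Nat.add_sub_cancel]; exact hcov⟩)]
        rw [pvA_closed words cs ov ((K' * s : Nat) : Int) (Mx : Int) hcs
          (by rw [hstep]; exact hdE)
          (by rw [hn]; omega)
          (by rw [hn, hstep]; omega)
          (by rw [hstep]; exact hMxd) (by rw [hn]; omega)
          (by rw [hn, hstep]; omega) (K' + 1) (by omega)
          (by
            have hEM : K' * s ≤ Mx := hMxge K' (by omega)
            rw [hstep, min_eq_left (by exact_mod_cast hEM)]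
            push_cast [← hss]
            ring)]
        rw [hstep, hcdef, hsdef]
      · have hElt : K' * s + c < n := by omega
        by_cases htail : (K' + 1) * s < n
        · -- a trailing partial window
          rw [if_pos ⟨by
              intro habs
              have h1 := congrArg List.length habs
              simp only [List.length_take, List.length_drop, List.length_nil, hn] at h1
              omega, by
              rw [decide_eq_false_iff_not]
              rintro ⟨-, habs⟩
              simp only [Nat.add_sub_cancel] at habs
              omega⟩]
          rw [pvA_closed words cs ov (((K' + 1) * s : Nat) : Int) (Mx : Int) hcs
            (by rw [hstep]; exact hdT)
            (by rw [hn]; omega)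
            (by rw [hn, hstep]; omega)
            (by rw [hstep]; exact hMxd) (by rw [hn]; omega)
            (by rw [hn, hstep]; omega) (K' + 2) (by omega)
            (by
              have hTM : (K' + 1) * s ≤ Mx := hMxge (K' + 1) (by omega)
              rw [hstep, min_eq_left (by exact_mod_cast hTM)]
              push_cast [← hss]
              ring)]
          rw [hstep, hcdef, hsdef]
          rw [show K' + 2 = (K' + 1) + 1 from rfl, List.range_succ, List.map_append]
          congr 1
          simp only [List.map_cons, List.map_nil]
          congr 1
          unfold pvG
          have e1 : (words.drop ((K' + 1) * s)).take c = words.drop ((K' + 1) * s) :=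
            List.take_of_length_le (by simp only [List.length_drop]; rw [hn]; omega)
          have e2 : (words.drop ((K' + 1) * s)).take (n - (K' + 1) * s) = words.drop ((K' + 1) * s) :=
            List.take_of_length_le (by simp only [List.length_drop]; rw [hn])
          rw [e1, e2]
        · -- the next start is past the end: no tail, the buffer is empty
          rw [if_neg (by
            rintro ⟨habs, -⟩
            apply habs
            rw [show n - (K' + 1) * s = 0 by omega, List.take_zero])]
          rw [pvA_closed words cs ov (((K' + 1) * s : Nat) : Int) ((K' * s : Nat) : Int) hcs
            (by rw [hstep]; exact hdT)
            (by rw [hn]; omega)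
            (by rw [hn, hstep]; omega)
            (by rw [hstep]; exact hdE)
            (by rw [hn]; omega)
            (by rw [hn, hstep]; omega)
            (K' + 1) (by omega)
            (by
              rw [hstep, min_eq_right (by exact_mod_cast Nat.le.intro hT.symm)]
              push_cast [← hss]
              ring)]
          rw [hstep, hcdef, hsdef]
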